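-- pv_equiv track=rewrite | github.com/Marcus3W/DSaA | week_2.py | isNotRepeated
-- ===== SOURCE A (Python) =====
-- def isNotRepeated(A):
--     for i in range(0, len(A)):
--         current_row = A[i]  #
--         for j in range(0, len(current_row)):
--             current_value = current_row[j]
--             if isInRow(current_value, current_row, j) and isInColumn(current_value, A, j, i):
--                 return False
--     return True
--
-- def isInRow(current_value, current_row, j):
--     # Checks if the next item in the row is the same
--     for k in range(0, len(current_row)):
--         # We skip the element that matches the current one at A[k]
--         # We just check the previous and next values in this row
--         # This avoids false positives
--         if k == j:
--             continue
--         if current_value == current_row[k]: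
--             return True
--     return False
--
-- def isInColumn(current_value, A, j, i):
--     for k in range(0, len(A)):
--         # We skip the row that matches the current one
--         # We just check the previous and next values in this column
--         # This avoids false positives
--         if k == i:
--             continue
--         if current_value == A[k][j]:
--             return True
--     return False
-- ===== SOURCE B (Python) =====
-- def isNotRepeated(A):
--     # Instead of rescanning the row and the column for every cell, build a
--     # (column index, value) frequency map and a per-row value frequency map
--     # once; each cell is then tested by two dictionary lookups.
--     col_counts = {}
--     for row in A:
--         for jv in enumerate(row):
--             col_counts[jv] = col_counts.get(jv, 0) + 1
--     for row in A:
--         row_counts = {}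
--         for v in row:
--             row_counts[v] = row_counts.get(v, 0) + 1
--         for j, v in enumerate(row):
--             if row_counts[v] > 1 and col_counts[(j, v)] > 1:
--                 return False
--     return True
-- ===== Notes on version B (the rewrite author's own statement) =====
-- stated objective: alternative
-- what changed: Replaced the per-cell rescans of the whole row and column (nested isInRow/isInColumn loops) by two frequency maps built once - a (column index, value) map and a per-row value map - so each cell is tested by two dictionary lookups; worst-case cost drops to O(n*m) but A's early exit makes it faster on duplicate-heavy inputs, so no speed is claimed.
-- outside the precondition, e.g. on isNotRepeated([[5, 0, 5], [5, 9]]): A returns False, B returns False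
import Mathlib
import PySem

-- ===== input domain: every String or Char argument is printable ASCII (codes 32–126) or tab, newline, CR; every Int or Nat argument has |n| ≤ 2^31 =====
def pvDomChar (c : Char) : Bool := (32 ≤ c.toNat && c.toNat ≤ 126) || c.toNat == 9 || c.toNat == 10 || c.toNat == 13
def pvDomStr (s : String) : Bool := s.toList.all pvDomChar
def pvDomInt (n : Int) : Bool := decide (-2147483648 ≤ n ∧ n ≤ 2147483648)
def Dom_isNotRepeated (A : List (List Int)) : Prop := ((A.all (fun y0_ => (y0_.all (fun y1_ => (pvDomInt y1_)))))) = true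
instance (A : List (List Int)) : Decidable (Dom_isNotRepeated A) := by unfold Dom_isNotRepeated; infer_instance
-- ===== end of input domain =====

-- B replaces A's per-cell row/column rescans by frequency maps built once (a different counting algorithm; no speed claim).

-- ===== PORT A =====
def isInRow (current_value : Int) (current_row : List Int) (j : Int) : Bool :=
  (PySem.List.pyRange 0 current_row.length 1).any (fun k =>
    !(k == j) && (current_value == PySem.List.pyGetD current_row k 0))

def isInColumn (current_value : Int) (A : List (List Int)) (j : Int) (i : Int) : Bool :=
  (PySem.List.pyRange 0 A.length 1).any (fun k =>
    !(k == i) && (current_value == PySem.List.pyGetD (PySem.List.pyGetD A k []) j 0))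

def isNotRepeated (A : List (List Int)) : Bool :=
  !((PySem.List.pyRange 0 A.length 1).any (fun i =>
      let current_row := PySem.List.pyGetD A i []
      (PySem.List.pyRange 0 current_row.length 1).any (fun j =>
        let current_value := PySem.List.pyGetD current_row j 0
        isInRow current_value current_row j && isInColumn current_value A j i)))

-- ===== PORT B =====
def isNotRepeated_alt (A : List (List Int)) : Bool :=
  let col_counts : PySem.Dict (Int × Int) Int :=
    A.foldl (fun d row =>
      (PySem.List.enumerate row).foldl (fun d jv => d.insert jv (d.getD jv 0 + 1)) d)
      PySem.Dict.empty
  !(A.any (fun row =>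
      let row_counts : PySem.Dict Int Int :=
        row.foldl (fun d v => d.insert v (d.getD v 0 + 1)) PySem.Dict.empty
      (PySem.List.enumerate row).any (fun jv =>
        decide (1 < row_counts.getD jv.2 0) && decide (1 < col_counts.getD jv 0))))

-- ===== PRECONDITION & SPEC =====
-- Pre_ excludes ragged matrices in which some row's repeated value sits at a column index beyond
-- the end of a shorter row: there A's column scan indexes A[k][j] and may raise IndexError.
def Pre_isNotRepeated (A : List (List Int)) : Prop :=
  ∀ m : Nat, (hm : m < A.length) → ∀ j : Nat, (hj : j < (A[m]'hm).length) →
    (∃ k, ∃ hk : k < (A[m]'hm).length, k ≠ j ∧ (A[m]'hm)[k] = (A[m]'hm)[j]) →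
    ∀ k : Nat, (hk : k < A.length) → j < (A[k]'hk).length
instance (A : List (List Int)) : Decidable (Pre_isNotRepeated A) := by
  unfold Pre_isNotRepeated; infer_instance

def pvWitness_isNotRepeated : List (List Int) := [[1, 2], [3, 4]]

def Spec_isNotRepeated (A : List (List Int)) (out : Bool) : Prop := out = isNotRepeated_alt A
instance (A : List (List Int)) (out : Bool) : Decidable (Spec_isNotRepeated A out) := by
  unfold Spec_isNotRepeated; infer_instance

-- ===== CLAIM (what is proved, stated in full; the proofs are below) =====
def Claim_equal_isNotRepeated : Prop :=
  ∀ (A : List (List Int)), Dom_isNotRepeated A → Pre_isNotRepeated A →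
    Spec_isNotRepeated A (isNotRepeated A)

-- ===== LEMMAS AND PROOFS =====

-- two distinct positions carrying a p-value (one of them given) ↔ countP exceeds 1
theorem countP_two {α : Type} (xs : List α) (p : α → Bool) (i : Nat) (h : i < xs.length) (hp : p xs[i]) :
    (∃ k, ∃ hk : k < xs.length, k ≠ i ∧ p xs[k]) ↔ 1 < xs.countP p := by
  have hsplit : xs = xs.take i ++ xs[i] :: xs.drop (i+1) := by
    conv_lhs => rw [← List.take_append_drop i xs]
    rw [List.getElem_cons_drop]
  conv_rhs => rw [hsplit]
  rw [List.countP_append, List.countP_cons, hp]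
  simp only [if_true]
  constructor
  · rintro ⟨k, hk, hki, hpk⟩
    rcases Nat.lt_or_ge k i with hlt | hge
    · have hmem : xs[k] ∈ xs.take i := by
        rw [List.mem_take_iff_getElem]
        exact ⟨k, by omega, by simp⟩
      have : 0 < (xs.take i).countP p := List.countP_pos_iff.mpr ⟨xs[k], hmem, hpk⟩
      omega
    · have hmem : xs[k] ∈ xs.drop (i+1) := by
        rw [List.mem_drop_iff_getElem]
        exact ⟨k - (i+1), by omega, by congr 1; omega⟩
      have : 0 < (xs.drop (i+1)).countP p := List.countP_pos_iff.mpr ⟨xs[k], hmem, hpk⟩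
      omega
  · intro hcnt
    have : 0 < (xs.take i).countP p ∨ 0 < (xs.drop (i+1)).countP p := by omega
    rcases this with hpos | hpos
    · obtain ⟨x, hx, hpx⟩ := List.countP_pos_iff.mp hpos
      rw [List.mem_take_iff_getElem] at hx
      obtain ⟨k, hk, hxk⟩ := hx
      exact ⟨k, by omega, by omega, by rw [← hxk] at hpx; simpa using hpx⟩
    · obtain ⟨x, hx, hpx⟩ := List.countP_pos_iff.mp hpos
      rw [List.mem_drop_iff_getElem] at hx
      obtain ⟨m, hm, hxm⟩ := hx
      exact ⟨i+1+m, by omega, by omega, by rw [← hxm] at hpx; simpa using hpx⟩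

theorem count_two (xs : List Int) (i : Nat) (h : i < xs.length) :
    (∃ k, ∃ hk : k < xs.length, k ≠ i ∧ xs[k] = xs[i]) ↔ 1 < xs.count xs[i] := by
  rw [List.count_eq_countP]
  rw [← countP_two xs (fun x => x == xs[i]) i h (by simp)]
  simp

theorem enum_count_lt (xs : List Int) (s t v : Int) (h : t < s) :
    (PySem.List.enumerate xs s).count (t, v) = 0 := by
  induction xs generalizing s with
  | nil => simp [PySem.List.enumerate_nil]
  | cons x xs ih =>
    rw [PySem.List.enumerate_cons, List.count_cons]
    rw [ih (s+1) (by omega)]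
    simp only [beq_iff_eq, Prod.mk.injEq]
    have : ¬ (t = s ∧ v = x) := by rintro ⟨h1, _⟩; omega
    simp_all
    omega

theorem enum_count (xs : List Int) (s : Int) (j : Nat) (v : Int) :
    (PySem.List.enumerate xs s).count (s + (j:Int), v) = if xs[j]? = some v then 1 else 0 := by
  induction xs generalizing s j with
  | nil => simp [PySem.List.enumerate_nil]
  | cons x xs ih =>
    rw [PySem.List.enumerate_cons, List.count_cons]
    cases j with
    | zero =>
      rw [show s + ((0:Nat):Int) = s by omega] at *
      rw [enum_count_lt xs (s+1) s v (by omega)]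
      by_cases hx : x = v <;> simp [hx]
    | succ j' =>
      have : s + ((j'+1:Nat):Int) = (s+1) + (j':Int) := by push_cast; omega
      rw [this, ih (s+1) j']
      simp only [List.getElem?_cons_succ]
      by_cases hxv : xs[j']? = some v <;> simp [hxv, Prod.ext_iff] <;> omega

theorem mem_enum (xs : List Int) (s : Int) (p : Int × Int) :
    p ∈ PySem.List.enumerate xs s ↔ ∃ j : Nat, ∃ h : j < xs.length, p = (s + (j:Int), xs[j]) := by
  induction xs generalizing s with
  | nil => simp [PySem.List.enumerate_nil]
  | cons x xs ih =>
    rw [PySem.List.enumerate_cons]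
    simp only [List.mem_cons, ih (s+1)]
    constructor
    · rintro (rfl | ⟨j, hj, rfl⟩)
      · exact ⟨0, by simp, by simp⟩
      · exact ⟨j+1, by simpa using Nat.succ_lt_succ hj, by simp; omega⟩
    · rintro ⟨j, hj, rfl⟩
      cases j with
      | zero => left; simp
      | succ j' =>
        right
        exact ⟨j', by simpa using Nat.lt_of_succ_lt_succ hj, by simp; omega⟩

-- the column-counter dictionary totals the per-row enumerate counts
theorem col_getD (A : List (List Int)) (d : PySem.Dict (Int × Int) Int) (key : Int × Int) :
    (A.foldl (fun d row =>
        (PySem.List.enumerate row).foldl (fun d jv => d.insert jv (d.getD jv 0 + 1)) d) d).getD key 0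
    = d.getD key 0 + (A.map (fun row => ((PySem.List.enumerate row).count key : Int))).sum := by
  induction A generalizing d with
  | nil => simp
  | cons r rs ih =>
    rw [List.foldl_cons, ih, PySem.Dict.getD_foldl_insert_add_one]
    simp
    ring

-- shuttle: an Int index ranging over [0, n) is a Nat index
theorem int_nat_ex (n : Nat) (P : Int → Prop) :
    (∃ x : Int, (0 ≤ x ∧ x < (n:Int)) ∧ P x) ↔ ∃ m : Nat, m < n ∧ P (m:Int) := by
  constructor
  · rintro ⟨x, ⟨h0, hn⟩, hP⟩
    refine ⟨x.toNat, by omega, ?_⟩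
    rwa [Int.toNat_of_nonneg h0]
  · rintro ⟨m, hm, hP⟩
    exact ⟨(m:Int), ⟨by omega, by omega⟩, hP⟩

theorem isInRow_iff (v : Int) (row : List Int) (j : Nat) :
    isInRow v row (j:Int) = true ↔ ∃ k, ∃ hk : k < row.length, k ≠ j ∧ row[k] = v := by
  rw [isInRow, List.any_eq_true]
  simp only [PySem.List.mem_pyRange_one]
  rw [int_nat_ex row.length (fun k => (!(k == (j:Int)) && (v == PySem.List.pyGetD row k 0)) = true)]
  apply exists_congr; intro k
  constructor
  · rintro ⟨hk, hp⟩
    simp only [Bool.and_eq_true, Bool.not_eq_true', beq_eq_false_iff_ne, beq_iff_eq,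
      PySem.List.pyGetD_natCast, ne_eq, Nat.cast_inj] at hp
    exact ⟨hk, hp.1, by rw [List.getD_eq_getElem row 0 hk] at hp; omega⟩
  · rintro ⟨hk, hkj, hv⟩
    refine ⟨hk, ?_⟩
    simp only [Bool.and_eq_true, Bool.not_eq_true', beq_eq_false_iff_ne, beq_iff_eq,
      PySem.List.pyGetD_natCast, ne_eq, Nat.cast_inj]
    exact ⟨hkj, by rw [List.getD_eq_getElem row 0 hk]; omega⟩

theorem isInColumn_iff (v : Int) (A : List (List Int)) (j : Int) (i : Nat) :
    isInColumn v A j (i:Int) = true ↔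
      ∃ k, ∃ hk : k < A.length, k ≠ i ∧ PySem.List.pyGetD A[k] j 0 = v := by
  rw [isInColumn, List.any_eq_true]
  simp only [PySem.List.mem_pyRange_one]
  rw [int_nat_ex A.length (fun k =>
    (!(k == (i:Int)) && (v == PySem.List.pyGetD (PySem.List.pyGetD A k []) j 0)) = true)]
  apply exists_congr; intro k
  constructor
  · rintro ⟨hk, hp⟩
    simp only [Bool.and_eq_true, Bool.not_eq_true', beq_eq_false_iff_ne, beq_iff_eq,
      PySem.List.pyGetD_natCast, ne_eq, Nat.cast_inj] at hp
    rw [List.getD_eq_getElem A [] hk] at hp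
    exact ⟨hk, hp.1, hp.2.symm⟩
  · rintro ⟨hk, hki, hv⟩
    refine ⟨hk, ?_⟩
    simp only [Bool.and_eq_true, Bool.not_eq_true', beq_eq_false_iff_ne, beq_iff_eq,
      PySem.List.pyGetD_natCast, ne_eq, Nat.cast_inj]
    rw [List.getD_eq_getElem A [] hk]
    exact ⟨hki, hv.symm⟩

theorem a_true_iff (A : List (List Int)) :
    isNotRepeated A = true ↔
      ¬ ∃ m : Nat, ∃ hm : m < A.length, ∃ j : Nat, ∃ hj : j < A[m].length,
          (∃ k, ∃ hk : k < A[m].length, k ≠ j ∧ A[m][k] = A[m][j]) ∧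
          (∃ k, ∃ hk : k < A.length, k ≠ m ∧ PySem.List.pyGetD A[k] (j:Int) 0 = A[m][j]) := by
  rw [isNotRepeated, Bool.not_eq_eq_eq_not, Bool.not_true, ← Bool.not_eq_true, not_iff_not]
  rw [List.any_eq_true]
  simp only [PySem.List.mem_pyRange_one]
  rw [int_nat_ex A.length _]
  apply exists_congr; intro m
  constructor
  · rintro ⟨hm, hin⟩
    refine ⟨hm, ?_⟩
    rw [PySem.List.pyGetD_natCast, List.getD_eq_getElem A [] hm] at hin
    rw [List.any_eq_true] at hin
    simp only [PySem.List.mem_pyRange_one] at hin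
    rw [int_nat_ex A[m].length _] at hin
    obtain ⟨j, hj, hcell⟩ := hin
    rw [PySem.List.pyGetD_natCast, List.getD_eq_getElem A[m] 0 hj] at hcell
    rw [Bool.and_eq_true, isInRow_iff, isInColumn_iff] at hcell
    exact ⟨j, hj, hcell.1, hcell.2⟩
  · rintro ⟨hm, j, hj, hrow, hcol⟩
    refine ⟨hm, ?_⟩
    rw [PySem.List.pyGetD_natCast, List.getD_eq_getElem A [] hm]
    rw [List.any_eq_true]
    simp only [PySem.List.mem_pyRange_one]
    rw [int_nat_ex A[m].length _]
    refine ⟨j, hj, ?_⟩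
    rw [PySem.List.pyGetD_natCast, List.getD_eq_getElem A[m] 0 hj]
    rw [Bool.and_eq_true, isInRow_iff, isInColumn_iff]
    exact ⟨hrow, hcol⟩

theorem alt_true_iff (A : List (List Int)) :
    isNotRepeated_alt A = true ↔
      ¬ ∃ m : Nat, ∃ hm : m < A.length, ∃ j : Nat, ∃ hj : j < A[m].length,
          1 < List.count A[m][j] A[m] ∧
          1 < (A.map (fun row => ((PySem.List.enumerate row).count ((j:Int), A[m][j]) : Int))).sum := by
  rw [isNotRepeated_alt]
  rw [Bool.not_eq_eq_eq_not, Bool.not_true, ← Bool.not_eq_true, not_iff_not]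
  rw [List.any_eq_true]
  constructor
  · rintro ⟨row, hrowmem, hany⟩
    obtain ⟨m, hm, rfl⟩ := List.mem_iff_getElem.mp hrowmem
    rw [List.any_eq_true] at hany
    obtain ⟨jv, hjv, hcond⟩ := hany
    obtain ⟨j, hj, rfl⟩ := (mem_enum _ 0 jv).mp hjv
    rw [Bool.and_eq_true, decide_eq_true_iff, decide_eq_true_iff] at hcond
    rw [PySem.Dict.getD_foldl_insert_add_one, PySem.Dict.getD_empty] at hcond
    rw [col_getD, PySem.Dict.getD_empty] at hcond
    refine ⟨m, hm, j, hj, ?_, ?_⟩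
    · have := hcond.1; simp at this; exact_mod_cast this
    · have := hcond.2; simpa using this
  · rintro ⟨m, hm, j, hj, hrc, hcc⟩
    refine ⟨A[m], List.getElem_mem hm, ?_⟩
    rw [List.any_eq_true]
    refine ⟨((j:Int), A[m][j]), (mem_enum _ 0 _).mpr ⟨j, hj, by simp⟩, ?_⟩
    rw [Bool.and_eq_true, decide_eq_true_iff, decide_eq_true_iff]
    rw [PySem.Dict.getD_foldl_insert_add_one, PySem.Dict.getD_empty]
    rw [col_getD, PySem.Dict.getD_empty]
    constructor
    · simpa using hrc
    · simpa using hcc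

-- the column part of a cell test, valid once every row reaches column j
theorem col_iff (A : List (List Int)) (m : Nat) (hm : m < A.length) (j : Nat)
    (hj : j < (A[m]'hm).length)
    (hL : ∀ k : Nat, (hk : k < A.length) → j < (A[k]'hk).length) :
    (∃ k, ∃ hk : k < A.length, k ≠ m ∧ PySem.List.pyGetD (A[k]'hk) (j:Int) 0 = (A[m]'hm)[j]) ↔
      1 < (A.map (fun row => ((PySem.List.enumerate row).count ((j:Int), (A[m]'hm)[j]) : Int))).sum := by
  have hsum : (A.map (fun row => ((PySem.List.enumerate row).count ((j:Int), A[m][j]) : Int))).sum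
      = ((A.countP (fun row => row[j]? == some A[m][j]) : Nat) : Int) := by
    rw [show (fun row : List Int => ((PySem.List.enumerate row).count ((j:Int), A[m][j]) : Int))
         = fun row => if (row[j]? == some A[m][j]) = true then (1:Int) else 0 by
      funext row
      rw [show ((j:Int)) = 0 + (j:Int) by omega, enum_count row 0 j A[m][j]]
      by_cases hx : row[j]? = some A[m][j] <;> simp [hx]]
    exact PySem.List.sum_map_ite_one_zero _ A
  rw [hsum]
  have hp : (A[m][j]? == some A[m][j]) = true := by
    simp [List.getElem?_eq_getElem hj]
  rw [show ((1:Int) < ((A.countP (fun row => row[j]? == some A[m][j]) : Nat) : Int)) ↔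
        1 < A.countP (fun row => row[j]? == some A[m][j]) by exact_mod_cast Iff.rfl]
  rw [← countP_two A (fun row => row[j]? == some A[m][j]) m hm hp]
  apply exists_congr; intro k
  apply exists_congr; intro hk
  apply and_congr_right; intro _
  have hjk := hL k hk
  rw [PySem.List.pyGetD_natCast, List.getD_eq_getElem A[k] 0 hjk,
    List.getElem?_eq_getElem hjk]
  simp

-- ===== VERDICT (by name: the statement is the Claim_ definition above) =====
theorem isNotRepeated_spec : Claim_equal_isNotRepeated := by
  intro A _ hpre
  unfold Spec_isNotRepeated
  rw [Bool.eq_iff_iff, a_true_iff, alt_true_iff]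
  apply not_congr
  constructor
  · rintro ⟨m, hm, j, hj, hrow, hcol⟩
    have hL := hpre m hm j hj hrow
    exact ⟨m, hm, j, hj, (count_two A[m] j hj).mp hrow, (col_iff A m hm j hj hL).mp hcol⟩
  · rintro ⟨m, hm, j, hj, hcnt, hsum⟩
    have hrow := (count_two A[m] j hj).mpr hcnt
    have hL := hpre m hm j hj hrow
    exact ⟨m, hm, j, hj, hrow, (col_iff A m hm j hj hL).mpr hsum⟩
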